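-- pv_equiv track=rewrite | github.com/Vishwaaashish/ai-growth-os | backend/app/core/intelligence/strategy/strategy_selector.py | select_final_strategy
-- ===== SOURCE A (Python) =====
-- def select_final_strategy(decisions):
--
--     if not decisions:
--         return "balanced"
--
--     decision_set = {d.get("decision") for d in decisions}
--
--     # 🔥 PRIORITY 1 — CREATIVE (ABSOLUTE)
--     if "creative_needed" in decision_set:
--         return "generate_creative"
--
--     # 🔥 PRIORITY 2 — SCALE
--     if "exploit" in decision_set:
--         return "scale"
--
--     # 🔥 PRIORITY 3 — SAFE MODE
--     if "explore" in decision_set: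
--         return "balanced"
--
--     return "balanced"
-- ===== SOURCE B (Python) =====
-- _RANK = {"creative_needed": 1, "exploit": 2, "explore": 3}
-- _RESULT = {1: "generate_creative", 2: "scale"}
--
-- def select_final_strategy(decisions):
--     best = 4
--     for d in decisions:
--         r = _RANK.get(d.get("decision"), 4)
--         if r < best:
--             best = r
--     return _RESULT.get(best, "balanced")
-- ===== Notes on version B (the rewrite author's own statement) =====
-- stated objective: alternative
-- what changed: Replaces building a set of all decision labels plus an ordered chain of membership tests by a single accumulating scan that tracks the minimum priority rank via a label->rank table, then maps the best rank to the result string (4/no-match and 3/'explore' both map to 'balanced', which also covers the empty list).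
import Mathlib
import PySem

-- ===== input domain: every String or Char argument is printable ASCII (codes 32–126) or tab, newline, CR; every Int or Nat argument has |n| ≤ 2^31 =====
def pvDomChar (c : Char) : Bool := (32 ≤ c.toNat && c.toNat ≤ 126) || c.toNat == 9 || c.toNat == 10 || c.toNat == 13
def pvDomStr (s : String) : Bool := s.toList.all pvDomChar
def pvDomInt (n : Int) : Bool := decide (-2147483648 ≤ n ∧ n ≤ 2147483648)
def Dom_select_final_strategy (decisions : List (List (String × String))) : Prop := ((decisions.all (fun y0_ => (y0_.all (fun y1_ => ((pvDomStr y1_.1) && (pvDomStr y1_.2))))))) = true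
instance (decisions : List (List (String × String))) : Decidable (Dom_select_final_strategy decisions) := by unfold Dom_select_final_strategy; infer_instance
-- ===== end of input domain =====

-- B replaces A's set-of-labels + ordered membership tests by one min-rank scan; objective: alternative decomposition.
-- ===== PORT A =====
def select_final_strategy (decisions : List (List (String × String))) : String :=
  if decisions = [] then "balanced"
  else
    let decision_set : PySem.Set (Option String) :=
      PySem.Set.ofList (decisions.map (fun d => PySem.Dict.get? (PySem.Dict.mk d) "decision"))
    if decision_set.contains (some "creative_needed") then "generate_creative"
    else if decision_set.contains (some "exploit") then "scale"
    else if decision_set.contains (some "explore") then "balanced"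
    else "balanced"

-- ===== PORT B =====
def pvRANK : PySem.Dict String Nat :=
  PySem.Dict.mk [("creative_needed", 1), ("exploit", 2), ("explore", 3)]
def pvRESULT : PySem.Dict Nat String :=
  PySem.Dict.mk [(1, "generate_creative"), (2, "scale")]
-- _RANK.get(o, 4) where o : Optional[str]; None matches no string key, so it takes the default
def pvRankOf (o : Option String) : Nat :=
  match o with
  | some s => PySem.Dict.getD pvRANK s 4
  | none => 4

def select_final_strategy_alt (decisions : List (List (String × String))) : String :=
  let best := decisions.foldl (fun best d =>
      let r := pvRankOf (PySem.Dict.get? (PySem.Dict.mk d) "decision")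
      if r < best then r else best) 4
  PySem.Dict.getD pvRESULT best "balanced"

-- ===== PRECONDITION & SPEC =====
def Spec_select_final_strategy (decisions : List (List (String × String))) (out : String) : Prop := out = select_final_strategy_alt decisions
instance (decisions : List (List (String × String))) (out : String) : Decidable (Spec_select_final_strategy decisions out) := by unfold Spec_select_final_strategy; infer_instance

-- ===== CLAIM (what is proved, stated in full; the proofs are below) =====
def Claim_equal_select_final_strategy : Prop := ∀ (decisions : List (List (String × String))), Dom_select_final_strategy decisions → Spec_select_final_strategy decisions (select_final_strategy decisions)

-- ===== LEMMAS AND PROOFS =====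
def pvGet (d : List (String × String)) : Option String :=
  PySem.Dict.get? (PySem.Dict.mk d) "decision"

def pvFold (l : List (List (String × String))) (b : Nat) : Nat :=
  l.foldl (fun best d =>
      let r := pvRankOf (PySem.Dict.get? (PySem.Dict.mk d) "decision")
      if r < best then r else best) b

theorem pvRankOf_some (s : String) :
    pvRankOf (some s) = if s = "creative_needed" then 1 else if s = "exploit" then 2
      else if s = "explore" then 3 else 4 := by
  by_cases h1 : s = "creative_needed"
  · subst h1; decide
  by_cases h2 : s = "exploit"
  · subst h2; decide
  by_cases h3 : s = "explore"
  · subst h3; decide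
  have e1 : ("creative_needed" == s) = false := beq_eq_false_iff_ne.mpr (fun h => h1 h.symm)
  have e2 : ("exploit" == s) = false := beq_eq_false_iff_ne.mpr (fun h => h2 h.symm)
  have e3 : ("explore" == s) = false := beq_eq_false_iff_ne.mpr (fun h => h3 h.symm)
  simp [pvRankOf, pvRANK, PySem.Dict.getD, PySem.Dict.get?, List.find?, e1, e2, e3, h1, h2, h3]

theorem pvRankOf_bounds (o : Option String) : 1 ≤ pvRankOf o ∧ pvRankOf o ≤ 4 := by
  cases o with
  | none => decide
  | some s => rw [pvRankOf_some]; split_ifs <;> omega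

theorem pvRankOf_eq_one (o : Option String) : pvRankOf o = 1 ↔ o = some "creative_needed" := by
  cases o with
  | none => decide
  | some s =>
    rw [pvRankOf_some]
    split_ifs <;> simp_all

theorem pvRankOf_le_two (o : Option String) :
    pvRankOf o ≤ 2 ↔ o = some "creative_needed" ∨ o = some "exploit" := by
  cases o with
  | none => decide
  | some s =>
    rw [pvRankOf_some]
    split_ifs <;> simp_all

theorem pvFold_le (l : List (List (String × String))) (b : Nat) : pvFold l b ≤ b := by
  induction l generalizing b with
  | nil => simp [pvFold]
  | cons d l ih =>
    simp only [pvFold, List.foldl_cons] at *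
    split
    · exact le_trans (ih _) (by omega)
    · exact ih b

theorem pvFold_pos (l : List (List (String × String))) (b : Nat) (hb : 1 ≤ b) : 1 ≤ pvFold l b := by
  induction l generalizing b with
  | nil => simpa [pvFold]
  | cons d l ih =>
    simp only [pvFold, List.foldl_cons] at *
    split
    · exact ih _ (pvRankOf_bounds _).1
    · exact ih b hb

theorem pvFold_le_iff (k : Nat) (l : List (List (String × String))) (b : Nat) :
    pvFold l b ≤ k ↔ b ≤ k ∨ ∃ d ∈ l, pvRankOf (pvGet d) ≤ k := by
  induction l generalizing b with
  | nil => simp [pvFold]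
  | cons d l ih =>
    simp only [pvFold, List.foldl_cons] at *
    rw [ih]
    simp only [List.mem_cons, pvGet]
    constructor
    · rintro (h | ⟨d', hd', hr⟩)
      · split at h
        · right; exact ⟨d, Or.inl rfl, h⟩
        · left; exact h
      · right; exact ⟨d', Or.inr hd', hr⟩
    · rintro (h | ⟨d', (rfl | hd'), hr⟩)
      · left; split <;> omega
      · left; split <;> omega
      · right; exact ⟨d', hd', hr⟩

theorem mem_set_iff (decisions : List (List (String × String))) (o : Option String) :
    (PySem.Set.ofList (decisions.map (fun d => PySem.Dict.get? (PySem.Dict.mk d) "decision"))).contains o = true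
      ↔ ∃ d ∈ decisions, pvGet d = o := by
  rw [PySem.Set.contains_iff, PySem.Set.mem_ofList]
  simp [pvGet, eq_comm]

-- ===== VERDICT (by name: the statement is the Claim_ definition above) =====
theorem select_final_strategy_spec : Claim_equal_select_final_strategy := by
  intro decisions _
  unfold Spec_select_final_strategy select_final_strategy select_final_strategy_alt
  rw [show (decisions.foldl (fun best d =>
      let r := pvRankOf (PySem.Dict.get? (PySem.Dict.mk d) "decision")
      if r < best then r else best) 4) = pvFold decisions 4 from rfl]
  have h1 := pvFold_le_iff 1 decisions 4
  have h2 := pvFold_le_iff 2 decisions 4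
  have hpos := pvFold_pos decisions 4 (by omega)
  have hle := pvFold_le decisions 4
  by_cases hc1 : ∃ d ∈ decisions, pvGet d = some "creative_needed"
  · have hne : decisions ≠ [] := by rcases hc1 with ⟨d, hd, _⟩; exact List.ne_nil_of_mem hd
    have : pvFold decisions 4 = 1 := by
      have : pvFold decisions 4 ≤ 1 := h1.mpr (Or.inr (by
        rcases hc1 with ⟨d, hd, hg⟩
        exact ⟨d, hd, by rw [(pvRankOf_eq_one _).mpr hg]⟩))
      omega
    rw [this]
    simp only [if_neg hne]
    rw [if_pos ((mem_set_iff decisions _).mpr hc1)]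
    decide
  · by_cases hc2 : ∃ d ∈ decisions, pvGet d = some "exploit"
    · have hne : decisions ≠ [] := by rcases hc2 with ⟨d, hd, _⟩; exact List.ne_nil_of_mem hd
      have hf2 : pvFold decisions 4 ≤ 2 := h2.mpr (Or.inr (by
        rcases hc2 with ⟨d, hd, hg⟩
        exact ⟨d, hd, (pvRankOf_le_two _).mpr (Or.inr hg)⟩))
      have hf1 : ¬ pvFold decisions 4 ≤ 1 := by
        intro h
        rcases (h1.mp h) with h | ⟨d, hd, hr⟩
        · omega
        · have := (pvRankOf_bounds (pvGet d)).1
          exact hc1 ⟨d, hd, (pvRankOf_eq_one _).mp (by omega)⟩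
      have : pvFold decisions 4 = 2 := by omega
      rw [this]
      simp only [if_neg hne]
      rw [if_neg (by intro h; exact hc1 ((mem_set_iff decisions _).mp h)),
          if_pos ((mem_set_iff decisions _).mpr hc2)]
      decide
    · have hf2 : ¬ pvFold decisions 4 ≤ 2 := by
        intro h
        rcases (h2.mp h) with h | ⟨d, hd, hr⟩
        · omega
        · rcases (pvRankOf_le_two _).mp hr with hg | hg
          · exact hc1 ⟨d, hd, hg⟩
          · exact hc2 ⟨d, hd, hg⟩
      have h34 : pvFold decisions 4 = 3 ∨ pvFold decisions 4 = 4 := by omega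
      have hres : PySem.Dict.getD pvRESULT (pvFold decisions 4) "balanced" = "balanced" := by
        rcases h34 with h | h <;> rw [h] <;> decide
      rw [hres]
      by_cases hne : decisions = []
      · simp [hne]
      · simp only [if_neg hne]
        rw [if_neg (by intro h; exact hc1 ((mem_set_iff decisions _).mp h)),
            if_neg (by intro h; exact hc2 ((mem_set_iff decisions _).mp h))]
        split <;> rfl
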